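-- pv_equiv track=rewrite | github.com/lexibank/tlopo | lib/parse.py | glosses_and_note
-- ===== SOURCE A (Python) =====
-- def glosses_and_note(s):
--     glosses = []
--     s = s.replace("men's", "men__s")
--     rem = s
--     while "'" in rem:
--         gloss, _, rem = rem.partition("'")
--         assert gloss.strip()
--         glosses.append(gloss.strip())
--         rem = rem.strip()
--         if rem.startswith(","):
--             rem = rem[1:].strip()
--         if rem.startswith("'"):
--             assert "'" in rem[1:], s
--             rem = rem[1:].strip()
--         #
--         # FIXME: parse nested protoforms ...
--         #
--         #elif proto_pattern.match(rem):
--         #    # POc *bayat 'fence, boundary marker', POc *bayat-i 'make a garden boundary'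
--         #    #
--         #    # FIXME: handle three reconstructions!
--         #    #
--         #    rec = Reconstruction.from_data(protoform=rem)
--         #    glosses.extend(rec.glosses)
--         #    break
--         else:
--             break
--     return glosses, rem.strip()
-- ===== SOURCE B (Python) =====
-- def glosses_and_note(s):
--     parts = s.replace("men's", "men__s").split("'")
--     glosses = []
--     i = 0
--     while i < len(parts) - 1:
--         gloss = parts[i].strip()
--         assert gloss
--         glosses.append(gloss)
--         sep = parts[i + 1].lstrip()
--         if sep.startswith(","):
--             sep = sep[1:].lstrip()
--         if sep == "" and i + 2 <= len(parts) - 1: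
--             # an opening quote follows immediately; it must be matched further on
--             assert i + 2 < len(parts) - 1, s
--             i += 2
--         else:
--             return glosses, "'".join([sep] + parts[i + 2:]).strip()
--     return glosses, parts[-1].strip()
-- ===== Notes on version B (the rewrite author's own statement) =====
-- stated objective: faster
-- what changed: B splits the string on "'" once and walks the resulting parts list by index (gloss part + separator part per step), instead of A's while-loop that re-partitions and re-strips a fresh copy of the remaining string on every iteration; the trailing note is rebuilt by re-joining the unconsumed parts.
import Mathlib
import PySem

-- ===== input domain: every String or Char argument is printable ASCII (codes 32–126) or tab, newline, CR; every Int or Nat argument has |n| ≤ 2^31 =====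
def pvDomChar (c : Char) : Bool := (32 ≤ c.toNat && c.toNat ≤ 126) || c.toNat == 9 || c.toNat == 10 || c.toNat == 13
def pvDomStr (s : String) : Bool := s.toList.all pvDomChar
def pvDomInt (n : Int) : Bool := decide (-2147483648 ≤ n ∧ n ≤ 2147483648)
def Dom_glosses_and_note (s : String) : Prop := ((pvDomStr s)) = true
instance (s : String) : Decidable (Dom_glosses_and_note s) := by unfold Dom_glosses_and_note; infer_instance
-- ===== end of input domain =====

-- B re-parses the string as one split("'") pass walked over the quote-separated parts instead of
-- A's repeated partition/strip rescanning of the remaining string; equal return values on Pre_.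

-- ===== PORT A =====
-- termination helpers for A's while-loop (rem strictly shrinks each iteration)
theorem pvStripLen (x : List Char) : (PySem.Chars.strip x).length ≤ x.length := by
  simp only [PySem.Chars.strip, PySem.Chars.rstrip, PySem.Chars.lstrip, List.length_reverse]
  calc (List.dropWhile PySem.Chars.isspace (List.dropWhile PySem.Chars.isspace x).reverse).length
      ≤ (List.dropWhile PySem.Chars.isspace x).reverse.length := List.length_dropWhile_le _ _
    _ = (List.dropWhile PySem.Chars.isspace x).length := List.length_reverse
    _ ≤ x.length := List.length_dropWhile_le _ _

theorem pvIsInMem (c : Char) (x : List Char) :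
    PySem.Chars.isIn [c] x = true ↔ c ∈ x := by
  rw [PySem.Chars.isIn_iff_infix]
  constructor
  · intro h; exact h.sublist.subset (List.mem_singleton_self c)
  · intro h
    obtain ⟨s, t, rfl⟩ := List.append_of_mem h
    exact ⟨s, t, by simp⟩

theorem pvDropWhileQuote (x : List Char) (h : PySem.Chars.isIn ['\''] x = true) :
    (x.dropWhile (fun c => c != '\'')).length ≠ 0 := by
  have hm : '\'' ∈ x := (pvIsInMem _ _).mp h
  intro hlen
  rw [List.length_eq_zero_iff, List.dropWhile_eq_nil_iff] at hlen
  simpa using hlen _ hm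

-- literal port of A's while-loop; `none` = an `assert` fired (Python raises there, outside Pre_).
-- Python's rem.partition("'") is ported for its single-char separator as takeWhile/dropWhile at
-- the first quote (exact whenever "'" is in rem, which A's loop guard guarantees).
def loopA (glosses : List (List Char)) (rem : List Char) :
    Option (List (List Char) × List Char) :=
  if hq : PySem.Chars.isIn ['\''] rem = true then
    let gloss := rem.takeWhile (fun c => c != '\'')
    let rem1 := (rem.dropWhile (fun c => c != '\'')).drop 1
    if PySem.Chars.strip gloss = [] then none          -- assert gloss.strip()
    else
      let glosses' := glosses ++ [PySem.Chars.strip gloss]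
      let rem2 := PySem.Chars.strip rem1
      let rem3 := if PySem.Chars.startswith rem2 [','] = true then
                    PySem.Chars.strip (rem2.drop 1) else rem2
      if PySem.Chars.startswith rem3 ['\''] = true then
        if PySem.Chars.isIn ['\''] (rem3.drop 1) = true then
          loopA glosses' (PySem.Chars.strip (rem3.drop 1))
        else none                                      -- assert "'" in rem[1:]
      else some (glosses', PySem.Chars.strip rem3)     -- break; return rem.strip()
  else some (glosses, PySem.Chars.strip rem)
termination_by rem.length
decreasing_by
  have h1 : (rem.dropWhile (fun c => c != '\'')).length ≠ 0 := pvDropWhileQuote rem hq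
  have h2 : (rem.dropWhile (fun c => c != '\'')).length ≤ rem.length := List.length_dropWhile_le _ _
  have h3 := pvStripLen ((rem.dropWhile (fun c => c != '\'')).drop 1)
  have h5 := pvStripLen ((PySem.Chars.strip ((rem.dropWhile (fun c => c != '\'')).drop 1)).drop 1)
  have h6 := pvStripLen ((PySem.Chars.strip ((PySem.Chars.strip ((rem.dropWhile (fun c => c != '\'')).drop 1)).drop 1)).drop 1)
  split <;> (simp only [List.length_drop] at *; omega)

def glosses_and_note (s : String) : List String × String :=
  let s2 := PySem.Chars.replace s.toList "men's".toList "men__s".toList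
  match loopA [] s2 with
  | some (gs, note) => (gs.map String.ofList, String.ofList note)
  | none => ([], "")                                   -- assert fired: Python raises (outside Pre_)

-- ===== PORT B =====
-- literal port of Source B: one split("'"), then an index walk over the parts (two per step);
-- `none` = an `assert` fired (Source B keeps A's two asserts; outside Pre_).
def loopB (glosses : List (List Char)) : List (List Char) → Option (List (List Char) × List Char)
  | [] => some (glosses, [])                           -- unreachable: split never returns []
  | [last] => some (glosses, PySem.Chars.strip last)   -- i = len(parts)-1: the while loop exits
  | p :: sp :: rest =>
    let g := PySem.Chars.strip p
    if g = [] then none                                -- assert gloss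
    else
      let sep0 := PySem.Chars.lstrip sp
      let sep := if PySem.Chars.startswith sep0 [','] = true then
                   PySem.Chars.lstrip (sep0.drop 1) else sep0
      if sep = [] ∧ rest ≠ [] then
        if rest.length < 2 then none                   -- assert i + 2 < len(parts) - 1
        else loopB (glosses ++ [g]) rest
      else some (glosses ++ [g], PySem.Chars.strip (PySem.Chars.join ['\''] (sep :: rest)))

def glosses_and_note_alt (s : String) : List String × String :=
  let parts := PySem.Chars.splitOn
    (PySem.Chars.replace s.toList "men's".toList "men__s".toList) ['\'']
  match loopB [] parts with
  | some (gs, note) => (gs.map String.ofList, String.ofList note)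
  | none => ([], "")                                   -- assert fired (outside Pre_)

-- ===== PRECONDITION & SPEC =====
def pvParts (s : String) : List (List Char) :=
  PySem.Chars.splitOn (PySem.Chars.replace s.toList "men's".toList "men__s".toList) ['\'']

-- a separator part that A's loop consumes: after an optional leading comma it strips to nothing
def pvSepClears (cs : List Char) : Bool :=
  (if PySem.Chars.startswith (PySem.Chars.lstrip cs) [','] = true then
    PySem.Chars.lstrip ((PySem.Chars.lstrip cs).drop 1) else PySem.Chars.lstrip cs) = []

-- the gloss at even position i is reached by A's loop iff every odd separator part before it
-- clears and is followed by a further quote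
def pvChainOK (parts : List (List Char)) (i : Nat) : Bool :=
  (List.range i).all fun j =>
    j % 2 == 0 || (pvSepClears (parts.getD j []) && decide (j + 1 < parts.length - 1))

-- Pre_ excludes exactly the inputs on which A's asserts fire (AssertionError): a reached quoted
-- gloss that strips to empty, or a reached lone opening quote whose closing quote is missing.
def Pre_glosses_and_note (s : String) : Prop :=
  ((List.range ((pvParts s).length - 1)).all fun i =>
    i % 2 == 1 || !pvChainOK (pvParts s) i ||
    (!(PySem.Chars.strip ((pvParts s).getD i []) == []) &&
      (!(pvSepClears ((pvParts s).getD (i+1) []) &&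
          decide (i + 1 < (pvParts s).length - 1)) ||
        decide (i + 2 < (pvParts s).length - 1)))) = true
instance (s : String) : Decidable (Pre_glosses_and_note s) := by
  unfold Pre_glosses_and_note; infer_instance

def pvWitness_glosses_and_note : String := "fence' , 'boundary marker' note"

def Spec_glosses_and_note (s : String) (out : List String × String) : Prop := out = glosses_and_note_alt s
instance (s : String) (out : List String × String) : Decidable (Spec_glosses_and_note s out) := by unfold Spec_glosses_and_note; infer_instance

-- ===== CLAIM (what is proved, stated in full; the proofs are below) =====
def Claim_equal_glosses_and_note : Prop := ∀ (s : String), Dom_glosses_and_note s → Pre_glosses_and_note s → Spec_glosses_and_note s (glosses_and_note s)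

-- ===== LEMMAS AND PROOFS =====
-- strip algebra on List Char
theorem pv_lstrip_append (a b : List Char) :
    PySem.Chars.lstrip (a ++ b) =
      if PySem.Chars.lstrip a = [] then PySem.Chars.lstrip b else PySem.Chars.lstrip a ++ b := by
  by_cases h : PySem.Chars.lstrip a = [] <;>
    simp_all [PySem.Chars.lstrip, List.dropWhile_append, List.isEmpty_iff]

theorem pv_rstrip_append (a b : List Char) :
    PySem.Chars.rstrip (a ++ b) =
      if PySem.Chars.rstrip b = [] then PySem.Chars.rstrip a else a ++ PySem.Chars.rstrip b := by
  simp only [PySem.Chars.rstrip, List.reverse_append, List.dropWhile_append]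
  by_cases h : List.dropWhile PySem.Chars.isspace b.reverse = []
  · simp [h]
  · simp [h, List.isEmpty_iff, List.reverse_eq_nil_iff, List.reverse_append]

theorem pv_lstrip_cons_false (c : Char) (t : List Char) (h : PySem.Chars.isspace c = false) :
    PySem.Chars.lstrip (c :: t) = c :: t := by
  simp [PySem.Chars.lstrip, List.dropWhile_cons, h]

theorem pv_lstrip_cons_true (c : Char) (t : List Char) (h : PySem.Chars.isspace c = true) :
    PySem.Chars.lstrip (c :: t) = PySem.Chars.lstrip t := by
  simp [PySem.Chars.lstrip, List.dropWhile_cons, h]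

theorem pv_rstrip_cons (c : Char) (t : List Char) (h : PySem.Chars.isspace c = false) :
    PySem.Chars.rstrip (c :: t) = c :: PySem.Chars.rstrip t := by
  have h1 : PySem.Chars.rstrip [c] = [c] := by simp [PySem.Chars.rstrip, h]
  rw [show (c :: t : List Char) = [c] ++ t from rfl, pv_rstrip_append]
  by_cases h3 : PySem.Chars.rstrip t = []
  · rw [if_pos h3, h1, h3]
  · rw [if_neg h3]
    rfl

theorem pv_lstrip_idem (x : List Char) :
    PySem.Chars.lstrip (PySem.Chars.lstrip x) = PySem.Chars.lstrip x := by
  induction x with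
  | nil => rfl
  | cons c t ih =>
    by_cases h : PySem.Chars.isspace c
    · rw [pv_lstrip_cons_true c t h]; exact ih
    · rw [pv_lstrip_cons_false c t (by simpa using h), pv_lstrip_cons_false c t (by simpa using h)]

theorem pv_rstrip_idem (x : List Char) :
    PySem.Chars.rstrip (PySem.Chars.rstrip x) = PySem.Chars.rstrip x := by
  have := pv_lstrip_idem x.reverse
  simp only [PySem.Chars.rstrip, PySem.Chars.lstrip] at *
  rw [List.reverse_reverse, this]

theorem pv_lstrip_rstrip_comm (x : List Char) :
    PySem.Chars.lstrip (PySem.Chars.rstrip x) = PySem.Chars.rstrip (PySem.Chars.lstrip x) := by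
  induction x with
  | nil => rfl
  | cons c t ih =>
    by_cases h : PySem.Chars.isspace c
    · rw [pv_lstrip_cons_true c t h, ← ih]
      have h2 := pv_rstrip_append [c] t
      by_cases h3 : PySem.Chars.rstrip t = []
      · have h4 : PySem.Chars.rstrip [c] = [] := by simp [PySem.Chars.rstrip, h]
        simp only [h3, if_pos, h4, List.singleton_append] at h2
        rw [h2, h3]
      · simp only [h3, if_neg, not_false_iff, List.singleton_append] at h2
        rw [h2, pv_lstrip_cons_true c _ h]
    · have h' : PySem.Chars.isspace c = false := by simpa using h
      rw [pv_lstrip_cons_false c t h', pv_rstrip_cons c t h', pv_lstrip_cons_false c _ h']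

theorem pv_strip_lstrip (x : List Char) :
    PySem.Chars.strip (PySem.Chars.lstrip x) = PySem.Chars.strip x := by
  simp [PySem.Chars.strip, pv_lstrip_idem]

theorem pv_strip_rstrip (x : List Char) :
    PySem.Chars.strip (PySem.Chars.rstrip x) = PySem.Chars.strip x := by
  simp only [PySem.Chars.strip]
  rw [pv_lstrip_rstrip_comm, pv_rstrip_idem]

theorem pv_strip_strip (x : List Char) :
    PySem.Chars.strip (PySem.Chars.strip x) = PySem.Chars.strip x := by
  simp only [PySem.Chars.strip]
  rw [pv_lstrip_rstrip_comm, pv_lstrip_idem, pv_rstrip_idem]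

theorem pv_strip_quote (a b : List Char) :
    PySem.Chars.strip (a ++ '\'' :: b) =
      PySem.Chars.lstrip a ++ '\'' :: PySem.Chars.rstrip b := by
  have hq : PySem.Chars.isspace '\'' = false := by decide
  have hqb : PySem.Chars.rstrip ('\'' :: b) = '\'' :: PySem.Chars.rstrip b := pv_rstrip_cons _ _ hq
  simp only [PySem.Chars.strip]
  rw [pv_lstrip_append]
  by_cases h : PySem.Chars.lstrip a = []
  · rw [if_pos h, h, pv_lstrip_cons_false _ _ hq, hqb, List.nil_append]
  · rw [if_neg h, pv_rstrip_append, hqb]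
    simp

theorem pv_lstrip_head (x : List Char) (c : Char) (t : List Char)
    (h : PySem.Chars.lstrip x = c :: t) : PySem.Chars.isspace c = false := by
  induction x with
  | nil => simp [PySem.Chars.lstrip] at h
  | cons d u ih =>
    by_cases hd : PySem.Chars.isspace d
    · exact ih (by rwa [pv_lstrip_cons_true d u hd] at h)
    · have hd' : PySem.Chars.isspace d = false := by simpa using hd
      rw [pv_lstrip_cons_false d u hd'] at h
      cases h; exact hd'

-- membership through strips
theorem pv_mem_lstrip (c : Char) (x : List Char) (h : c ∈ PySem.Chars.lstrip x) : c ∈ x :=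
  (List.dropWhile_sublist _).subset h

theorem pv_mem_rstrip (c : Char) (x : List Char) (h : c ∈ PySem.Chars.rstrip x) : c ∈ x := by
  simp only [PySem.Chars.rstrip] at h
  rw [List.mem_reverse] at h
  simpa using (List.dropWhile_sublist _).subset h

theorem pv_mem_strip (c : Char) (x : List Char) (h : c ∈ PySem.Chars.strip x) : c ∈ x :=
  pv_mem_lstrip c x (pv_mem_rstrip c _ h)

theorem pv_mem_rstrip_iff (c : Char) (x : List Char) (hc : PySem.Chars.isspace c = false) :
    c ∈ PySem.Chars.rstrip x ↔ c ∈ x := by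
  constructor
  · exact pv_mem_rstrip c x
  · intro h
    induction x with
    | nil => simp at h
    | cons d u ih =>
      have h2 := pv_rstrip_append [d] u
      by_cases h3 : PySem.Chars.rstrip u = []
      · have hd : c = d := by
          rcases List.mem_cons.mp h with rfl | hu
          · rfl
          · exact absurd (h3 ▸ ih hu) (List.not_mem_nil)
        subst hd
        simp only [h3, if_pos, List.singleton_append] at h2
        rw [h2]
        simp [PySem.Chars.rstrip, hc]
      · simp only [h3, if_neg, not_false_iff, List.singleton_append] at h2
        rw [h2]
        rcases List.mem_cons.mp h with rfl | hu
        · exact List.mem_cons_self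
        · exact List.mem_cons_of_mem _ (ih hu)

-- takeWhile/dropWhile at the first quote
theorem pv_takeWhile_quote (a b : List Char) (h : '\'' ∉ a) :
    (a ++ '\'' :: b).takeWhile (fun c => c != '\'') = a := by
  induction a with
  | nil => simp
  | cons c t ih =>
    simp only [List.mem_cons, not_or] at h
    have hc : (c != '\'') = true := by
      rw [bne_iff_ne]
      exact fun e => h.1 e.symm
    simp [List.takeWhile_cons, hc, ih h.2]

theorem pv_dropWhile_quote (a b : List Char) (h : '\'' ∉ a) :
    (a ++ '\'' :: b).dropWhile (fun c => c != '\'') = '\'' :: b := by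
  induction a with
  | nil => simp
  | cons c t ih =>
    simp only [List.mem_cons, not_or] at h
    have hc : (c != '\'') = true := by
      rw [bne_iff_ne]
      exact fun e => h.1 e.symm
    simp [List.dropWhile_cons, hc, ih h.2]

-- startswith on a one-char prefix
theorem pv_startswith_nil (c : Char) : PySem.Chars.startswith [] [c] = false := by
  simp [PySem.Chars.startswith, List.isPrefixOf]

theorem pv_startswith_cons (c d : Char) (t : List Char) :
    PySem.Chars.startswith (d :: t) [c] = (c == d) := by
  simp [PySem.Chars.startswith, List.isPrefixOf]

-- join and the modified-head combinator
def pvModHead (x : List Char) : List (List Char) → List (List Char)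
  | [] => [x]
  | h :: t => (x ++ h) :: t

theorem pv_modHead_modHead (x y : List Char) (l : List (List Char)) :
    pvModHead x (pvModHead y l) = pvModHead (x ++ y) l := by
  cases l <;> simp [pvModHead]

theorem pv_join_modHead (c : Char) (l : List (List Char)) (h : l ≠ []) :
    PySem.Chars.join ['\''] (pvModHead [c] l) = c :: PySem.Chars.join ['\''] l := by
  match l with
  | [x] => simp [pvModHead, PySem.Chars.join_singleton]
  | x :: y :: t =>
    simp [pvModHead, PySem.Chars.join_cons_cons]

-- a clean structural model of s.split("'")
def pvCleanSplit : List Char → List (List Char)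
  | [] => [[]]
  | c :: rest => if c = '\'' then [] :: pvCleanSplit rest else pvModHead [c] (pvCleanSplit rest)

theorem pv_cleanSplit_ne_nil (l : List Char) : pvCleanSplit l ≠ [] := by
  cases l with
  | nil => simp [pvCleanSplit]
  | cons c rest =>
    simp only [pvCleanSplit]
    split
    · simp
    · cases h : pvCleanSplit rest <;> simp [pvModHead]

theorem pv_cleanSplit_quote_free (l : List Char) :
    ∀ p ∈ pvCleanSplit l, '\'' ∉ p := by
  induction l with
  | nil => simp [pvCleanSplit]
  | cons c rest ih =>
    intro p hp
    simp only [pvCleanSplit] at hp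
    split at hp
    · rcases List.mem_cons.mp hp with rfl | hp2
      · simp
      · exact ih p hp2
    · rename_i hc
      cases h : pvCleanSplit rest with
      | nil => exact absurd h (pv_cleanSplit_ne_nil rest)
      | cons q t =>
        rw [h] at hp
        rcases List.mem_cons.mp hp with rfl | hp2
        · intro hmem
          rcases List.mem_cons.mp (by simpa [pvModHead] using hmem) with rfl | h2
          · exact hc rfl
          · exact ih q (h ▸ List.mem_cons_self) h2
        · exact ih p (h ▸ List.mem_cons_of_mem _ hp2)

theorem pv_join_cleanSplit (l : List Char) :
    PySem.Chars.join ['\''] (pvCleanSplit l) = l := by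
  induction l with
  | nil => simp [pvCleanSplit, PySem.Chars.join_singleton]
  | cons c rest ih =>
    simp only [pvCleanSplit]
    split
    · rename_i hc
      subst hc
      cases h : pvCleanSplit rest with
      | nil => exact absurd h (pv_cleanSplit_ne_nil rest)
      | cons q t =>
        rw [h] at ih
        rw [PySem.Chars.join_cons_cons]
        simp [ih]
    · rw [pv_join_modHead c _ (pv_cleanSplit_ne_nil rest), ih]

-- the fueled splitOn.go computes pvCleanSplit
theorem pv_splitOn_go (fuel : Nat) (l cur : List Char) (acc : List (List Char))
    (h : l.length ≤ fuel) :
    PySem.Chars.splitOn.go ['\''] fuel l cur acc =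
      acc.reverse ++ pvModHead cur.reverse (pvCleanSplit l) := by
  induction fuel generalizing l cur acc with
  | zero =>
    have hl : l = [] := List.length_eq_zero_iff.mp (Nat.le_zero.mp h)
    subst hl
    simp [PySem.Chars.splitOn.go, pvCleanSplit, pvModHead]
  | succ fuel ih =>
    cases l with
    | nil => simp [PySem.Chars.splitOn.go, pvCleanSplit, pvModHead]
    | cons c rest =>
      by_cases hc : c = '\''
      · subst hc
        have hpre : List.isPrefixOf ['\''] ('\'' :: rest) = true := by
          simp [List.isPrefixOf]
        rw [PySem.Chars.splitOn.go]
        simp only [hpre, if_pos, List.length_singleton]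
        rw [show List.drop 1 ('\'' :: rest) = rest from rfl]
        rw [ih rest [] (cur.reverse :: acc) (by simpa using Nat.le_of_succ_le_succ h)]
        simp only [pvCleanSplit, if_pos, List.reverse_cons, List.reverse_nil]
        cases hcs : pvCleanSplit rest with
        | nil => exact absurd hcs (pv_cleanSplit_ne_nil rest)
        | cons q t => simp [pvModHead]
      · have hpre : List.isPrefixOf ['\''] (c :: rest) = false := by
          simp [List.isPrefixOf]
          intro h'; exact absurd h'.symm hc
        rw [PySem.Chars.splitOn.go]
        simp only [hpre, Bool.false_eq_true, if_false]
        rw [ih rest (c :: cur) acc (by simpa using Nat.le_of_succ_le_succ h)]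
        simp only [pvCleanSplit, hc, if_neg, List.reverse_cons]
        rw [← pv_modHead_modHead cur.reverse [c] (pvCleanSplit rest)]
        cases pvCleanSplit rest <;> simp [pvModHead]

theorem pv_splitOn_eq (l : List Char) :
    PySem.Chars.splitOn l ['\''] = pvCleanSplit l := by
  rw [PySem.Chars.splitOn, pv_splitOn_go l.length.succ l [] [] (Nat.le_succ _)]
  cases h : pvCleanSplit l with
  | nil => exact absurd h (pv_cleanSplit_ne_nil l)
  | cons q t => simp [pvModHead]

theorem pv_startswith_notmem (c : Char) (x : List Char) (h : c ∉ x) :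
    PySem.Chars.startswith x [c] = false := by
  cases x with
  | nil => exact pv_startswith_nil c
  | cons d t =>
    rw [pv_startswith_cons]
    simp only [List.mem_cons, not_or] at h
    simpa using h.1

theorem pv_dropWhile_head_eq (x : List Char) (e : Char) (b : List Char)
    (h : x.dropWhile (fun c => c != '\'') = e :: b) : e = '\'' := by
  induction x with
  | nil => simp at h
  | cons d u ih =>
    rw [List.dropWhile_cons] at h
    split at h
    · exact ih h
    · rename_i hd
      cases h
      simpa using hd

-- A's loop is invariant under stripping its remaining string
theorem pv_loopA_strip (g : List (List Char)) (x : List Char) :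
    loopA g (PySem.Chars.strip x) = loopA g x := by
  by_cases hm : '\'' ∈ x
  · have hne : x.dropWhile (fun c => c != '\'') ≠ [] := by
      intro h0
      rw [List.dropWhile_eq_nil_iff] at h0
      simpa using h0 _ hm
    obtain ⟨b, hb⟩ : ∃ b, x.dropWhile (fun c => c != '\'') = '\'' :: b := by
      cases hd : x.dropWhile (fun c => c != '\'') with
      | nil => exact absurd hd hne
      | cons e b => exact ⟨b, by rw [pv_dropWhile_head_eq x e b hd]⟩
    have hx : x = x.takeWhile (fun c => c != '\'') ++ '\'' :: b := by
      conv_lhs => rw [← List.takeWhile_append_dropWhile (p := fun c => c != '\'') (l := x)]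
      rw [hb]
    have hqa : '\'' ∉ x.takeWhile (fun c => c != '\'') := by
      intro hmem
      have := List.mem_takeWhile_imp hmem
      simp at this
    have hqa' : '\'' ∉ PySem.Chars.lstrip (x.takeWhile (fun c => c != '\'')) :=
      fun hmem => hqa (pv_mem_lstrip _ _ hmem)
    rw [hx, pv_strip_quote]
    have hIn1 : PySem.Chars.isIn ['\'']
        (PySem.Chars.lstrip (x.takeWhile (fun c => c != '\'')) ++ '\'' :: PySem.Chars.rstrip b) = true := by
      rw [pvIsInMem]; simp
    have hIn2 : PySem.Chars.isIn ['\'']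
        (x.takeWhile (fun c => c != '\'') ++ '\'' :: b) = true := by
      rw [pvIsInMem]; simp
    conv_lhs => rw [loopA.eq_def]
    conv_rhs => rw [loopA.eq_def]
    rw [dif_pos hIn1, dif_pos hIn2]
    simp only [pv_takeWhile_quote _ _ hqa', pv_dropWhile_quote _ _ hqa',
      pv_takeWhile_quote _ _ hqa, pv_dropWhile_quote _ _ hqa,
      List.drop_one, List.tail_cons, pv_strip_lstrip, pv_strip_rstrip]
  · have h1 : PySem.Chars.isIn ['\''] x = false := by
      rw [← Bool.not_eq_true, pvIsInMem]; exact hm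
    have h2 : PySem.Chars.isIn ['\''] (PySem.Chars.strip x) = false := by
      rw [← Bool.not_eq_true, pvIsInMem]
      exact fun hmem => hm (pv_mem_strip _ _ hmem)
    conv_lhs => rw [loopA.eq_def]
    conv_rhs => rw [loopA.eq_def]
    rw [dif_neg (by simp [h2]), dif_neg (by simp [h1]), pv_strip_strip]

-- A's comma handling on the stripped remainder = B's comma handling on the separator part
theorem pv_rem3_eq (sp K : List Char) :
    (if PySem.Chars.startswith (PySem.Chars.lstrip sp ++ '\'' :: PySem.Chars.rstrip K) [','] = true
      then PySem.Chars.strip ((PySem.Chars.lstrip sp ++ '\'' :: PySem.Chars.rstrip K).tail)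
      else PySem.Chars.lstrip sp ++ '\'' :: PySem.Chars.rstrip K) =
    (if PySem.Chars.startswith (PySem.Chars.lstrip sp) [','] = true
      then PySem.Chars.lstrip ((PySem.Chars.lstrip sp).drop 1)
      else PySem.Chars.lstrip sp) ++ '\'' :: PySem.Chars.rstrip K := by
  cases hsep : PySem.Chars.lstrip sp with
  | nil =>
    rw [List.nil_append, pv_startswith_cons, pv_startswith_nil]
    simp
  | cons c t =>
    rw [List.cons_append, pv_startswith_cons, pv_startswith_cons]
    by_cases hc : (',' == c) = true
    · rw [if_pos hc, if_pos hc, List.tail_cons, List.drop_one, List.tail_cons,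
        pv_strip_quote, pv_rstrip_idem]
    · rw [if_neg hc, if_neg hc, List.cons_append]

theorem pv_loop_eq : ∀ (ps : List (List Char)), (∀ p ∈ ps, '\'' ∉ p) → ∀ g : List (List Char),
    loopA g (PySem.Chars.join ['\''] ps) = loopB g ps
  | [], _, g => by
    have h0 : PySem.Chars.isIn ['\''] ([] : List Char) = false := by decide
    rw [PySem.Chars.join_nil, loopA.eq_def, dif_neg (by simp [h0])]
    rfl
  | [p], hq, g => by
    rw [PySem.Chars.join_singleton, loopA.eq_def]
    have hnot : ¬ PySem.Chars.isIn ['\''] p = true := by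
      rw [pvIsInMem]; exact hq p (by simp)
    rw [dif_neg hnot]
    simp [loopB]
  | p :: sp :: rest, hq, g => by
    have hqp : '\'' ∉ p := hq p (by simp)
    have hqsp : '\'' ∉ sp := hq sp (by simp)
    have hqsp0 : '\'' ∉ PySem.Chars.lstrip sp := fun h => hqsp (pv_mem_lstrip _ _ h)
    have hJ : PySem.Chars.join ['\''] (p :: sp :: rest) =
        p ++ '\'' :: PySem.Chars.join ['\''] (sp :: rest) := by
      rw [PySem.Chars.join_cons_cons]; simp
    rw [hJ]
    conv_lhs => rw [loopA.eq_def]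
    have hIn : PySem.Chars.isIn ['\''] (p ++ '\'' :: PySem.Chars.join ['\''] (sp :: rest)) = true := by
      rw [pvIsInMem]; simp
    rw [dif_pos hIn]
    simp only [pv_takeWhile_quote _ _ hqp, pv_dropWhile_quote _ _ hqp,
      List.drop_one, List.tail_cons]
    by_cases hp : PySem.Chars.strip p = []
    · simp [loopB, hp]
    · rw [if_neg hp]
      cases rest with
      | nil =>
        rw [PySem.Chars.join_singleton]
        conv_rhs => rw [loopB]
        simp only [hp, if_false]
        cases hsep : PySem.Chars.lstrip sp with
        | nil =>
          have hstr : PySem.Chars.strip sp = [] := by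
            simp only [PySem.Chars.strip]; rw [hsep]; rfl
          rw [hstr]
          simp [pv_startswith_nil, PySem.Chars.join_singleton]
        | cons c t =>
          have hcns : PySem.Chars.isspace c = false := pv_lstrip_head sp c t hsep
          have hstr : PySem.Chars.strip sp = c :: PySem.Chars.rstrip t := by
            simp only [PySem.Chars.strip]; rw [hsep, pv_rstrip_cons c t hcns]
          have hqt : '\'' ∉ t := fun h2 => hqsp0 (by rw [hsep]; exact List.mem_cons_of_mem _ h2)
          have hqst : '\'' ∉ PySem.Chars.strip t := fun h2 => hqt (pv_mem_strip _ _ h2)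
          rw [hstr]
          simp only [pv_startswith_cons]
          by_cases hc : (',' == c) = true
          · rw [if_pos hc, if_pos hc, List.tail_cons, pv_strip_rstrip,
              pv_startswith_notmem _ _ hqst]
            simp only [Bool.false_eq_true, if_false, pv_strip_strip, List.drop_one,
              List.tail_cons, PySem.Chars.join_singleton, pv_strip_lstrip]
            rw [if_neg (by simp)]
          · rw [if_neg hc, if_neg hc]
            have hqs : '\'' ∉ (c :: PySem.Chars.rstrip t) := by
              rw [← hstr]; exact fun h2 => hqsp (pv_mem_strip _ _ h2)
            rw [pv_startswith_notmem _ _ hqs]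
            simp only [Bool.false_eq_true, if_false, PySem.Chars.join_singleton]
            rw [← hstr, pv_strip_strip]
            rw [if_neg (by simp)]
            rw [show (c :: t : List Char) = PySem.Chars.lstrip sp from hsep.symm, pv_strip_lstrip]
      | cons r rest' =>
        have hK : PySem.Chars.join ['\''] (sp :: r :: rest') =
            sp ++ '\'' :: PySem.Chars.join ['\''] (r :: rest') := by
          rw [PySem.Chars.join_cons_cons]; simp
        rw [hK, pv_strip_quote, pv_rem3_eq]
        conv_rhs => rw [loopB]
        simp only [hp, if_false]
        have hqsep : '\'' ∉ (if PySem.Chars.startswith (PySem.Chars.lstrip sp) [','] = true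
            then PySem.Chars.lstrip ((PySem.Chars.lstrip sp).drop 1)
            else PySem.Chars.lstrip sp) := by
          split
          · exact fun h2 => hqsp0 ((List.drop_sublist _ _).subset (pv_mem_lstrip _ _ h2))
          · exact hqsp0
        cases hsep2 : (if PySem.Chars.startswith (PySem.Chars.lstrip sp) [','] = true
            then PySem.Chars.lstrip ((PySem.Chars.lstrip sp).drop 1)
            else PySem.Chars.lstrip sp) with
        | cons d u =>
          rw [hsep2] at hqsep
          have hdq : ('\'' == d) = false := by
            rw [beq_eq_false_iff_ne]
            intro e
            rw [e] at hqsep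
            exact hqsep List.mem_cons_self
          have hsw : PySem.Chars.startswith ((d :: u) ++ '\'' ::
              PySem.Chars.rstrip (PySem.Chars.join ['\''] (r :: rest'))) ['\''] = false := by
            rw [List.cons_append, pv_startswith_cons]
            exact hdq
          rw [hsw]
          simp only [Bool.false_eq_true, if_false]
          rw [pv_strip_quote, pv_rstrip_idem]
          rw [if_neg (by simp)]
          have hKj : PySem.Chars.join ['\''] ((d :: u) :: r :: rest') =
              (d :: u) ++ '\'' :: PySem.Chars.join ['\''] (r :: rest') := by
            rw [PySem.Chars.join_cons_cons]; simp
          rw [hKj, pv_strip_quote]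
        | nil =>
          rw [List.nil_append, pv_startswith_cons, List.tail_cons]
          rw [if_pos (show ('\'' == '\'') = true from rfl)]
          rw [if_pos (show ([] : List Char) = [] ∧ r :: rest' ≠ [] from ⟨rfl, List.cons_ne_nil r rest'⟩)]
          cases rest' with
          | nil =>
            have hniq : PySem.Chars.isIn ['\'']
                (PySem.Chars.rstrip (PySem.Chars.join ['\''] [r])) = false := by
              rw [← Bool.not_eq_true, pvIsInMem, PySem.Chars.join_singleton]
              exact fun h2 => hq r (by simp) (pv_mem_rstrip _ _ h2)
            rw [hniq]
            simp
          | cons y ys =>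
            have hqmem : '\'' ∈ PySem.Chars.rstrip (PySem.Chars.join ['\''] (r :: y :: ys)) := by
              rw [pv_mem_rstrip_iff _ _ (by decide), PySem.Chars.join_cons_cons]
              simp
            rw [if_pos ((pvIsInMem _ _).mpr hqmem)]
            rw [pv_strip_rstrip, pv_loopA_strip]
            rw [if_neg (show ¬ (r :: y :: ys).length < 2 by simp)]
            exact pv_loop_eq (r :: y :: ys)
              (fun q2 hq2 => hq q2 (List.mem_cons_of_mem _ (List.mem_cons_of_mem _ hq2))) _
termination_by ps => ps.length

theorem pv_main (s : String) : glosses_and_note s = glosses_and_note_alt s := by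
  simp only [glosses_and_note, glosses_and_note_alt]
  rw [pv_splitOn_eq]
  have h : loopA [] (PySem.Chars.replace s.toList "men's".toList "men__s".toList) =
      loopB [] (pvCleanSplit (PySem.Chars.replace s.toList "men's".toList "men__s".toList)) := by
    conv_lhs => rw [← pv_join_cleanSplit (PySem.Chars.replace s.toList "men's".toList "men__s".toList)]
    exact pv_loop_eq _ (pv_cleanSplit_quote_free _) []
  rw [h]

-- ===== VERDICT (by name: the statement is the Claim_ definition above) =====
theorem glosses_and_note_spec : Claim_equal_glosses_and_note := by
  intro s _ _
  unfold Spec_glosses_and_note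
  exact pv_main s
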